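-- pv_equiv track=rewrite | github.com/kimianoorbakhsh/Artificial-Intelligence-CE417 | 3. Local Search/Genetic.py | calculate_matching_cost_for_two
-- ===== SOURCE A (Python) =====
-- def calculate_matching_cost_for_two(string_1, string_2, table, alphabet):  # make sure len(string_1==len(string_2)
--     alphabet = dict(alphabet)
--     table = list(list(table))
--     sum = 0
--     for k in range(len(string_1)):
--         char_1 = string_1[k]
--         char_2 = string_2[k]
--         if char_1 != "-" and char_2 != "-":
--             i = alphabet.get(char_1)
--             j = alphabet.get(char_2)
--             sum = sum + table[i][j]
--         elif char_1 != "-":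
--             i = alphabet.get(char_1)
--             sum = sum + table[i][len(alphabet)]
--         elif char_2 != "-":
--             j = alphabet.get(char_2)
--             sum = sum + table[len(alphabet)][j]
--         else:
--             sum = sum + table[len(alphabet)][len(alphabet)]
--     return sum
--     pass
-- ===== SOURCE B (Python) =====
-- def calculate_matching_cost_for_two(string_1, string_2, table, alphabet):
--     alpha = dict(alphabet)
--     gap = len(alpha)
--     cnt = {}
--     for pair in zip(string_1, string_2):
--         cnt[pair] = cnt.get(pair, 0) + 1
--
--     def idx(c):
--         return gap if c == "-" else alpha.get(c)
--
--     return sum(n * table[idx(c1)][idx(c2)] for (c1, c2), n in cnt.items())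
-- ===== Notes on version B (the rewrite author's own statement) =====
-- stated objective: alternative
-- what changed: Instead of branching four ways and doing two table lookups at every position, B aggregates the zipped character pairs into a counter dict and sums count * cost over the distinct pairs, computing each distinct pair's cost once via a uniform index map (gap sentinel for '-').
import Mathlib
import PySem

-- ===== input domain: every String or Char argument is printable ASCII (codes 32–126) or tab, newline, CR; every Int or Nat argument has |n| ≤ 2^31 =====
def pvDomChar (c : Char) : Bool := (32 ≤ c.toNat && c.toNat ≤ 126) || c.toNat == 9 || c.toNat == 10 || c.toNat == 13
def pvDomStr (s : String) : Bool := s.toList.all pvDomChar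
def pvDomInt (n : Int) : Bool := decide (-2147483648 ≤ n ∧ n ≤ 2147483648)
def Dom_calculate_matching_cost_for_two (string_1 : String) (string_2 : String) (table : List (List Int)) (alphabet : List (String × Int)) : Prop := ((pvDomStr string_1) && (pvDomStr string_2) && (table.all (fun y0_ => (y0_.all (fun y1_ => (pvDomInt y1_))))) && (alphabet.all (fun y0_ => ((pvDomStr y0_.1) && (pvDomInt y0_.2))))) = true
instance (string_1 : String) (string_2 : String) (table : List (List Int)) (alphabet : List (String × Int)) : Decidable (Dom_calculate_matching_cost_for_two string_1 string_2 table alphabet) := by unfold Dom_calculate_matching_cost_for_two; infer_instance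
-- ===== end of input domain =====

-- B replaces A's per-position four-way branch by one aggregation pass (a counter over the zipped
-- character pairs) followed by a sum of count * cost over the distinct pairs, with a uniform
-- index map ('-' ↦ len(alphabet)); alternative decomposition, no speed claim.

-- ===== PORT A =====
def calculate_matching_cost_for_two (string_1 : String) (string_2 : String) (table : List (List Int)) (alphabet : List (String × Int)) : Int :=
  let d := PySem.Dict.ofList alphabet
  (List.range string_1.length).foldl (fun (sum : Int) (k : Nat) =>
    let char_1 := (PySem.Str.pyGet? string_1 (k : Int)).getD ' '   -- under Pre_ both indexings succeed
    let char_2 := (PySem.Str.pyGet? string_2 (k : Int)).getD ' '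
    if char_1 ≠ '-' ∧ char_2 ≠ '-' then
      let i := (d.get? char_1.toString).getD 0                     -- under Pre_ the lookup is some
      let j := (d.get? char_2.toString).getD 0
      sum + PySem.List.pyGetD (PySem.List.pyGetD table i []) j 0
    else if char_1 ≠ '-' then
      let i := (d.get? char_1.toString).getD 0
      sum + PySem.List.pyGetD (PySem.List.pyGetD table i []) (d.size : Int) 0
    else if char_2 ≠ '-' then
      let j := (d.get? char_2.toString).getD 0
      sum + PySem.List.pyGetD (PySem.List.pyGetD table (d.size : Int) []) j 0
    else
      sum + PySem.List.pyGetD (PySem.List.pyGetD table (d.size : Int) []) (d.size : Int) 0) 0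

-- ===== PORT B =====
def calculate_matching_cost_for_two_alt (string_1 : String) (string_2 : String) (table : List (List Int)) (alphabet : List (String × Int)) : Int :=
  let alpha := PySem.Dict.ofList alphabet
  let gap : Int := alpha.size
  let cnt := PySem.Dict.counter (string_1.toList.zip string_2.toList)
  let idx : Char → Int := fun c => if c = '-' then gap else (alpha.get? c.toString).getD 0
  (cnt.items.map (fun kn =>
     kn.2 * PySem.List.pyGetD (PySem.List.pyGetD table (idx kn.1.1) []) (idx kn.1.2) 0)).sum

-- ===== PRECONDITION & SPEC =====
-- pvCellOk: the cost lookup for one position, as Python performs it ('-' ↦ len(alphabet), else dict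
-- lookup, then two list indexings with Python's negative-index rule); none = Python A raises there.
def pvCellOk (d : PySem.Dict String Int) (table : List (List Int)) (p : Char × Char) : Option Int :=
  (if p.1 = '-' then some (d.size : Int) else d.get? p.1.toString).bind fun i =>
  (if p.2 = '-' then some (d.size : Int) else d.get? p.2.toString).bind fun j =>
  (PySem.List.pyGet? table i).bind fun row => PySem.List.pyGet? row j

-- Pre_ excludes exactly the inputs where Python A raises: string_2 shorter than string_1 (IndexError),
-- a non-gap character missing from alphabet (TypeError on table[None]), or a table index out of range (IndexError).
def Pre_calculate_matching_cost_for_two (string_1 : String) (string_2 : String) (table : List (List Int)) (alphabet : List (String × Int)) : Prop :=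
  string_1.length ≤ string_2.length ∧
  ∀ p ∈ string_1.toList.zip string_2.toList, (pvCellOk (PySem.Dict.ofList alphabet) table p).isSome = true
instance (string_1 : String) (string_2 : String) (table : List (List Int)) (alphabet : List (String × Int)) : Decidable (Pre_calculate_matching_cost_for_two string_1 string_2 table alphabet) := by unfold Pre_calculate_matching_cost_for_two; infer_instance

def pvWitness_calculate_matching_cost_for_two : String × String × List (List Int) × (List (String × Int)) :=
  ("ab-", "ba-", [[1,2,3],[4,5,6],[7,8,9]], [("a",0),("b",1)])

def Spec_calculate_matching_cost_for_two (string_1 : String) (string_2 : String) (table : List (List Int)) (alphabet : List (String × Int)) (out : Int) : Prop := out = calculate_matching_cost_for_two_alt string_1 string_2 table alphabet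
instance (string_1 : String) (string_2 : String) (table : List (List Int)) (alphabet : List (String × Int)) (out : Int) : Decidable (Spec_calculate_matching_cost_for_two string_1 string_2 table alphabet out) := by unfold Spec_calculate_matching_cost_for_two; infer_instance

-- ===== CLAIM (what is proved, stated in full; the proofs are below) =====
def Claim_equal_calculate_matching_cost_for_two : Prop := ∀ (string_1 : String) (string_2 : String) (table : List (List Int)) (alphabet : List (String × Int)), Dom_calculate_matching_cost_for_two string_1 string_2 table alphabet → Pre_calculate_matching_cost_for_two string_1 string_2 table alphabet → Spec_calculate_matching_cost_for_two string_1 string_2 table alphabet (calculate_matching_cost_for_two string_1 string_2 table alphabet)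

-- ===== LEMMAS AND PROOFS =====

theorem calculate_matching_cost_for_two_witness_ok :
    Dom_calculate_matching_cost_for_two (pvWitness_calculate_matching_cost_for_two.1) (pvWitness_calculate_matching_cost_for_two.2.1) (pvWitness_calculate_matching_cost_for_two.2.2.1) (pvWitness_calculate_matching_cost_for_two.2.2.2) ∧
    Pre_calculate_matching_cost_for_two (pvWitness_calculate_matching_cost_for_two.1) (pvWitness_calculate_matching_cost_for_two.2.1) (pvWitness_calculate_matching_cost_for_two.2.2.1) (pvWitness_calculate_matching_cost_for_two.2.2.2) := by
  decide

-- the cost A adds at one position, as an Option-free value (0 only outside Pre_)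
def pvCost (d : PySem.Dict String Int) (table : List (List Int)) (p : Char × Char) : Int :=
  (pvCellOk d table p).getD 0

theorem pv_pyGetD_eq {α : Type} (xs : List α) (i : Int) (d : α) :
    PySem.List.pyGetD xs i d = (PySem.List.pyGet? xs i).getD d := by
  simp [PySem.List.pyGetD, PySem.List.pyGet?]

theorem pv_sum_single {α : Type} [BEq α] [LawfulBEq α] (d : List α) (x : α) (f : α → Int)
    (hd : d.Nodup) (hx : x ∈ d) :
    (d.map (fun k => if k == x then f k else 0)).sum = f x := by
  induction d with
  | nil => cases hx
  | cons y ys ih =>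
    rcases List.nodup_cons.mp hd with ⟨hy, hys⟩
    by_cases hyx : y = x
    · subst hyx
      simp only [List.map_cons, List.sum_cons, beq_self_eq_true, if_true]
      have : (ys.map (fun k => if k == y then f k else 0)).sum = 0 := by
        apply List.sum_eq_zero
        intro z hz
        rcases List.mem_map.mp hz with ⟨k, hk, rfl⟩
        have : ¬ (k == y) = true := by
          intro hkk; exact hy (by rwa [eq_of_beq hkk] at hk)
        simp [this]
      simp [this]
    · have hx' : x ∈ ys := by
        rcases List.mem_cons.mp hx with rfl | h
        · exact absurd rfl hyx
        · exact h
      have hne : ¬ (y == x) = true := by simp [hyx]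
      simp only [List.map_cons, List.sum_cons, hne]
      simpa using ih hys hx'

theorem pv_sum_count {α : Type} [BEq α] [LawfulBEq α] (l d : List α) (f : α → Int)
    (hd : d.Nodup) (hsub : ∀ a ∈ l, a ∈ d) :
    (d.map (fun k => (l.count k : Int) * f k)).sum = (l.map f).sum := by
  induction l with
  | nil =>
    simp only [List.count_nil, List.map_nil, List.sum_nil, Int.natCast_zero, zero_mul]
    exact List.sum_eq_zero (by intro z hz; rcases List.mem_map.mp hz with ⟨k, _, rfl⟩; rfl)
  | cons x t ih =>
    have h1 : ∀ k, ((x :: t).count k : Int) * f k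
        = (t.count k : Int) * f k + (if k == x then f k else 0) := by
      intro k
      by_cases hk : k = x
      · subst hk; simp [List.count_cons]; ring
      · simp [beq_iff_eq, hk, Ne.symm hk]
    calc (d.map (fun k => ((x :: t).count k : Int) * f k)).sum
        = (d.map (fun k => (t.count k : Int) * f k + (if k == x then f k else 0))).sum := by
          exact congrArg _ (List.map_congr_left (fun k _ => h1 k))
      _ = (d.map (fun k => (t.count k : Int) * f k)).sum
          + (d.map (fun k => if k == x then f k else 0)).sum :=
          PySem.List.sum_map_add_int d _ _
      _ = (t.map f).sum + f x := by
          rw [ih (fun a ha => hsub a (List.mem_cons_of_mem x ha)),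
              pv_sum_single d x f hd (hsub x List.mem_cons_self)]
      _ = ((x :: t).map f).sum := by simp [add_comm]

theorem pvCost_table (d : PySem.Dict String Int) (table : List (List Int)) (c1 c2 : Char)
    (i j : Int)
    (hi : (if c1 = '-' then some (d.size : Int) else d.get? c1.toString) = some i)
    (hj : (if c2 = '-' then some (d.size : Int) else d.get? c2.toString) = some j)
    (h : (pvCellOk d table (c1, c2)).isSome = true) :
    PySem.List.pyGetD (PySem.List.pyGetD table i []) j 0 = pvCost d table (c1, c2) := by
  unfold pvCellOk at h
  unfold pvCost pvCellOk
  simp only [hi, hj, Option.bind_some] at h ⊢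
  cases hr : PySem.List.pyGet? table i with
  | none => rw [hr] at h; simp at h
  | some row =>
    rw [hr] at h
    simp only [Option.bind_some] at h
    cases hc : PySem.List.pyGet? row j with
    | none => rw [hc] at h; simp at h
    | some c =>
      simp [pv_pyGetD_eq, hr, hc]

theorem pvIdx_some (d : PySem.Dict String Int) (table : List (List Int)) (c1 c2 : Char)
    (h : (pvCellOk d table (c1, c2)).isSome = true) :
    ∃ i j, (if c1 = '-' then some (d.size : Int) else d.get? c1.toString) = some i ∧
           (if c2 = '-' then some (d.size : Int) else d.get? c2.toString) = some j := by
  unfold pvCellOk at h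
  cases hx : (if c1 = '-' then some (d.size : Int) else d.get? c1.toString) with
  | none => rw [hx] at h; simp at h
  | some i =>
    cases hy : (if c2 = '-' then some (d.size : Int) else d.get? c2.toString) with
    | none => rw [hx, hy] at h; simp at h
    | some j => exact ⟨i, j, rfl, rfl⟩

theorem pvIdx_eq (d : PySem.Dict String Int) (c : Char) (i : Int)
    (hi : (if c = '-' then some (d.size : Int) else d.get? c.toString) = some i) :
    (if c = '-' then (d.size : Int) else (d.get? c.toString).getD 0) = i := by
  by_cases hc : c = '-' <;> simp [hc] at hi ⊢ <;> simp [hi]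

theorem pvBranchB (d : PySem.Dict String Int) (table : List (List Int)) (c1 c2 : Char)
    (h : (pvCellOk d table (c1, c2)).isSome = true) :
    PySem.List.pyGetD (PySem.List.pyGetD table (if c1 = '-' then (d.size : Int) else (d.get? c1.toString).getD 0) [])
      (if c2 = '-' then (d.size : Int) else (d.get? c2.toString).getD 0) 0 = pvCost d table (c1, c2) := by
  obtain ⟨i, j, hi, hj⟩ := pvIdx_some d table c1 c2 h
  rw [pvIdx_eq d c1 i hi, pvIdx_eq d c2 j hj]
  exact pvCost_table d table c1 c2 i j hi hj h

theorem pvBranchA (d : PySem.Dict String Int) (table : List (List Int)) (c1 c2 : Char) (acc : Int)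
    (h : (pvCellOk d table (c1, c2)).isSome = true) :
    (if c1 ≠ '-' ∧ c2 ≠ '-' then
       acc + PySem.List.pyGetD (PySem.List.pyGetD table ((d.get? c1.toString).getD 0) []) ((d.get? c2.toString).getD 0) 0
     else if c1 ≠ '-' then
       acc + PySem.List.pyGetD (PySem.List.pyGetD table ((d.get? c1.toString).getD 0) []) (d.size : Int) 0
     else if c2 ≠ '-' then
       acc + PySem.List.pyGetD (PySem.List.pyGetD table (d.size : Int) []) ((d.get? c2.toString).getD 0) 0
     else
       acc + PySem.List.pyGetD (PySem.List.pyGetD table (d.size : Int) []) (d.size : Int) 0)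
    = acc + pvCost d table (c1, c2) := by
  have hB := pvBranchB d table c1 c2 h
  by_cases h1 : c1 = '-' <;> by_cases h2 : c2 = '-' <;>
    simp only [h1, h2, not_true, not_false_iff, ne_eq, and_true, true_and,
      and_false, false_and, if_true, if_false] at hB ⊢ <;>
    simpa using hB

theorem pv_A_eq_sum (s1 s2 : String) (table : List (List Int)) (alphabet : List (String × Int))
    (hlen : s1.length ≤ s2.length)
    (hc : ∀ p ∈ s1.toList.zip s2.toList,
      (pvCellOk (PySem.Dict.ofList alphabet) table p).isSome = true) :
    calculate_matching_cost_for_two s1 s2 table alphabet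
      = ((s1.toList.zip s2.toList).map (pvCost (PySem.Dict.ofList alphabet) table)).sum := by
  have hlen' : s1.toList.length ≤ s2.toList.length := by simpa using hlen
  unfold calculate_matching_cost_for_two
  refine Eq.trans (PySem.List.foldl_congr_mem _ _
    (fun (acc : Int) (k : Nat) => acc + pvCost (PySem.Dict.ofList alphabet) table
      ((s1.toList[k]?).getD ' ', (s2.toList[k]?).getD ' ')) 0 ?_) ?_
  · intro acc k hk
    have hk1 : k < s1.toList.length := by simpa using List.mem_range.mp hk
    have hk2 : k < s2.toList.length := lt_of_lt_of_le hk1 hlen'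
    rw [show (PySem.Str.pyGet? s1 (k : Int)) = some s1.toList[k] from by
          simp [List.getElem?_eq_getElem hk1],
        show (PySem.Str.pyGet? s2 (k : Int)) = some s2.toList[k] from by
          simp [List.getElem?_eq_getElem hk2]]
    simp only [Option.getD_some]
    have hmem : (s1.toList[k], s2.toList[k]) ∈ s1.toList.zip s2.toList := by
      have hzl : k < (s1.toList.zip s2.toList).length := by
        rw [List.length_zip]; exact lt_min hk1 hk2
      have : (s1.toList.zip s2.toList)[k]'hzl = (s1.toList[k], s2.toList[k]) := by
        simp [List.getElem_zip]
      rw [← this]; exact List.getElem_mem _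
    simp only [List.getElem?_eq_getElem hk1, List.getElem?_eq_getElem hk2, Option.getD_some]
    exact pvBranchA _ table _ _ acc (hc _ hmem)
  · rw [PySem.List.foldl_add, zero_add]
    congr 1
    apply List.ext_getElem
    · simp [Nat.min_eq_left hlen'] <;> simpa using hlen'
    · intro k hk1 hk2
      have hk1' : k < s1.toList.length := by simpa using hk1
      have hk2' : k < s2.toList.length := lt_of_lt_of_le hk1' hlen'
      simp only [List.getElem_map, List.getElem_range, List.getElem_zip,
        List.getElem?_eq_getElem hk1', List.getElem?_eq_getElem hk2', Option.getD_some]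

theorem pv_B_eq_sum (s1 s2 : String) (table : List (List Int)) (alphabet : List (String × Int))
    (hc : ∀ p ∈ s1.toList.zip s2.toList,
      (pvCellOk (PySem.Dict.ofList alphabet) table p).isSome = true) :
    calculate_matching_cost_for_two_alt s1 s2 table alphabet
      = ((s1.toList.zip s2.toList).map (pvCost (PySem.Dict.ofList alphabet) table)).sum := by
  unfold calculate_matching_cost_for_two_alt
  simp only [PySem.Dict.items_counter, List.map_map]
  rw [List.map_congr_left (g := fun k : Char × Char =>
      ((s1.toList.zip s2.toList).count k : Int) * pvCost (PySem.Dict.ofList alphabet) table k) ?_]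
  · exact pv_sum_count _ _ _ (PySem.Set.nodup_ofList _)
      (fun a ha => (PySem.Set.mem_ofList _ _).mpr ha)
  · intro k hk
    have hk' : k ∈ s1.toList.zip s2.toList := (PySem.Set.mem_ofList _ _).mp hk
    have hB := pvBranchB (PySem.Dict.ofList alphabet) table k.1 k.2 (by simpa using hc k hk')
    simp only [Function.comp_apply]
    rw [hB]

-- ===== VERDICT (by name: the statement is the Claim_ definition above) =====
theorem calculate_matching_cost_for_two_spec : Claim_equal_calculate_matching_cost_for_two := by
  intro s1 s2 table alphabet _ hpre
  unfold Spec_calculate_matching_cost_for_two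
  rcases hpre with ⟨hlen, hc⟩
  rw [pv_A_eq_sum s1 s2 table alphabet hlen hc, pv_B_eq_sum s1 s2 table alphabet hc]
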